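-- pv_equiv track=rewrite | github.com/Symbolk/AlgInPy | search/1162as-far-from-land-as-possible.py | maxDistance1
-- ===== SOURCE A (Python) =====
-- from typing import List
--
-- def maxDistance1(grid: List[List[int]]) -> int:
--     N = len(grid)
--     q = [(i, j) for i in range(N) for j in range(N) if grid[i][j]]
--
--     if not q or len(q) == N * N:
--         return -1
--
--     steps = -1  # depth of BFS
--     move = [(-1, 0), (1, 0), (0, -1), (0, 1)]
--     while q:
--         steps += 1
--         seas = []  # seas to explore in the next level
--         for x, y in q:  # for each land in the current level
--             for dx, dy in move:
--                 nx, ny = x + dx, y + dy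
--                 if 0 <= nx < N and 0 <= ny < N and not grid[nx][ny]:
--                     seas.append((nx, ny))
--                     grid[nx][ny] = 1  # mark as visited
--         q = seas
--     return steps
-- ===== SOURCE B (Python) =====
-- from typing import List
--
-- def maxDistance1(grid: List[List[int]]) -> int:
--     N = len(grid)
--     cur = [[1 if grid[i][j] else 0 for j in range(N)] for i in range(N)]
--     total = sum(v for row in cur for v in row)
--     if total == 0 or total == N * N:
--         return -1
--     steps = 0
--     while True:
--         nxt = [[1 if cur[i][j]
--                 or (i > 0 and cur[i - 1][j])
--                 or (i + 1 < N and cur[i + 1][j])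
--                 or (j > 0 and cur[i][j - 1])
--                 or (j + 1 < N and cur[i][j + 1]) else 0
--                 for j in range(N)] for i in range(N)]
--         if nxt == cur:
--             return steps
--         cur = nxt
--         steps += 1
-- ===== Notes on version B (the rewrite author's own statement) =====
-- stated objective: alternative
-- what changed: A runs a multi-source frontier BFS with a coordinate queue, mutating the grid in place as its visited set; B instead builds a 0/1 land mask and repeatedly dilates the whole mask (each cell becomes land if it or a 4-neighbour is land) until it stops changing, returning the number of effective dilation rounds, without mutating its argument.
import Mathlib
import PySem

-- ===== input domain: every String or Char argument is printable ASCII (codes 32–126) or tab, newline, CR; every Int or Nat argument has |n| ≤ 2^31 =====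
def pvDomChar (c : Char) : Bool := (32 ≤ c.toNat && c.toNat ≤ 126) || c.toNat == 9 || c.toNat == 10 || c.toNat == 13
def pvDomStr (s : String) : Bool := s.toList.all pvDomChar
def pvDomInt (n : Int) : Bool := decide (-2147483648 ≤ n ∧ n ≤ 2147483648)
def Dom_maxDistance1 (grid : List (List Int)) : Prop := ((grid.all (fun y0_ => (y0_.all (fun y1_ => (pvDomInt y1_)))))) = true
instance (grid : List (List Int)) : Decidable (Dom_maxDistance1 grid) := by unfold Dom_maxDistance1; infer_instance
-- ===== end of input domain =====

-- B replaces A's frontier-queue BFS (which mutates grid in place; the equivalence proved here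
-- is about the RETURN value only — B does not mutate its argument) by repeatedly dilating a
-- 0/1 land mask until it stops changing, counting the effective dilation rounds.

-- ===== PORT A =====
-- python: the body of the inner `for dx, dy in move` loop (grid write + seas append)
def pvStep (N : Int) (st : List (List Int) × List (Int × Int)) (nx ny : Int) :
    List (List Int) × List (Int × Int) :=
  if 0 ≤ nx ∧ nx < N ∧ 0 ≤ ny ∧ ny < N ∧
      PySem.List.pyGetD (PySem.List.pyGetD st.1 nx []) ny 0 = 0 then
    (PySem.List.pySetD st.1 nx (PySem.List.pySetD (PySem.List.pyGetD st.1 nx []) ny 1),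
     st.2 ++ [(nx, ny)])
  else st

def pvMoves : List (Int × Int) := [(-1, 0), (1, 0), (0, -1), (0, 1)]

-- python: one iteration of the `while q` loop body (seas starts empty, then the two nested fors)
def pvLevel (N : Int) (g : List (List Int)) (q : List (Int × Int)) :
    List (List Int) × List (Int × Int) :=
  q.foldl (fun st c => pvMoves.foldl (fun st d => pvStep N st (c.1 + d.1) (c.2 + d.2)) st) (g, [])

-- python: the `while q` loop; fuel only makes it total (2*N+2 rounds always suffice)
def pvLoopA (N : Int) (fuel : Nat) (g : List (List Int)) (q : List (Int × Int)) (steps : Int) : Int :=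
  if q = [] then steps
  else
    match fuel with
    | 0 => steps
    | f + 1 =>
      let st := pvLevel N g q
      pvLoopA N f st.1 st.2 (steps + 1)

def maxDistance1 (grid : List (List Int)) : Int :=
  let N : Int := grid.length
  let q := (List.range grid.length).flatMap (fun (i : Nat) =>
    ((List.range grid.length).filter (fun (j : Nat) =>
      PySem.List.pyGetD (PySem.List.pyGetD grid (i : Int) []) ((j : Int)) 0 ≠ 0)).map
      (fun (j : Nat) => ((i : Int), (j : Int))))
  if q = [] ∨ (q.length : Int) = N * N then -1
  else pvLoopA N (2 * grid.length + 2) grid q (-1)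

-- ===== PORT B =====
-- Source B: cur[i][j] (all reads are in range)
def pvMask (cur : List (List Int)) (i j : Nat) : Int := (cur.getD i []).getD j 0

-- Source B: the `nxt = [[...]]` comprehension
def pvDilate (N : Nat) (cur : List (List Int)) : List (List Int) :=
  (List.range N).map (fun i => (List.range N).map (fun j =>
    if pvMask cur i j ≠ 0 ∨ (0 < i ∧ pvMask cur (i - 1) j ≠ 0) ∨
        (i + 1 < N ∧ pvMask cur (i + 1) j ≠ 0) ∨ (0 < j ∧ pvMask cur i (j - 1) ≠ 0) ∨
        (j + 1 < N ∧ pvMask cur i (j + 1) ≠ 0)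
    then (1 : Int) else 0))

-- Source B: the `while True` loop; fuel only makes it total (2*N+1 rounds always suffice)
def pvLoopB (N : Nat) (fuel : Nat) (cur : List (List Int)) (steps : Int) : Int :=
  match fuel with
  | 0 => steps
  | f + 1 =>
    let nxt := pvDilate N cur
    if nxt = cur then steps else pvLoopB N f nxt (steps + 1)

def maxDistance1_alt (grid : List (List Int)) : Int :=
  let N := grid.length
  let cur := (List.range N).map (fun (i : Nat) => (List.range N).map (fun (j : Nat) =>
    if PySem.List.pyGetD (PySem.List.pyGetD grid (i : Int) []) ((j : Int)) 0 ≠ 0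
    then (1 : Int) else 0))
  let total := (cur.flatMap (fun row => row)).sum
  if total = 0 ∨ total = (N : Int) * N then -1
  else pvLoopB N (2 * N + 1) cur 0

-- ===== PRECONDITION & SPEC =====
-- Pre_ excludes only grids with a row shorter than the number of rows, on which A raises IndexError.
def Pre_maxDistance1 (grid : List (List Int)) : Prop :=
  ∀ row ∈ grid, grid.length ≤ row.length
instance (grid : List (List Int)) : Decidable (Pre_maxDistance1 grid) := by
  unfold Pre_maxDistance1; infer_instance

def pvWitness_maxDistance1 : List (List Int) := [[1, 0], [0, 0]]

def Spec_maxDistance1 (grid : List (List Int)) (out : Int) : Prop := out = maxDistance1_alt grid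
instance (grid : List (List Int)) (out : Int) : Decidable (Spec_maxDistance1 grid out) := by
  unfold Spec_maxDistance1; infer_instance

-- ===== CLAIM (what is proved, stated in full; the proofs are below) =====
def Claim_equal_maxDistance1 : Prop := ∀ (grid : List (List Int)), Dom_maxDistance1 grid →
  Pre_maxDistance1 grid → Spec_maxDistance1 grid (maxDistance1 grid)

-- ===== LEMMAS AND PROOFS =====

-- cell c lies in the N×N box
def pvBox (N : Nat) (c : Int × Int) : Prop :=
  0 ≤ c.1 ∧ c.1 < (N : Int) ∧ 0 ≤ c.2 ∧ c.2 < (N : Int)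

-- e is one of the four 4-neighbours of c
def pvAdj (c e : Int × Int) : Prop := ∃ m ∈ pvMoves, e = (c.1 + m.1, c.2 + m.2)

-- truthiness of a cell of A's grid / of B's mask (reads are in range wherever we use them)
def pvTA (g : List (List Int)) (c : Int × Int) : Prop :=
  PySem.List.pyGetD (PySem.List.pyGetD g c.1 []) c.2 0 ≠ 0

def pvTB (cur : List (List Int)) (c : Int × Int) : Prop := pvMask cur c.1.toNat c.2.toNat ≠ 0

-- A's grid keeps N rows of length ≥ N; B's mask is exactly N×N with 0/1 entries
def pvShaped (N : Nat) (g : List (List Int)) : Prop :=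
  g.length = N ∧ ∀ row ∈ g, N ≤ row.length

def pvMaskS (N : Nat) (cur : List (List Int)) : Prop :=
  cur.length = N ∧ ∀ row ∈ cur, row.length = N ∧ ∀ v ∈ row, v = 0 ∨ v = 1

-- the lock-step invariant between A's (grid, q) and B's mask
def pvRel (N : Nat) (g : List (List Int)) (q : List (Int × Int)) (cur : List (List Int)) : Prop :=
  pvShaped N g ∧ pvMaskS N cur ∧
  (∀ c, pvBox N c → (pvTA g c ↔ pvTB cur c)) ∧
  (∀ c ∈ q, pvBox N c ∧ pvTA g c) ∧
  (∀ c, pvBox N c → pvTA g c → ∀ e, pvBox N e → pvAdj c e → pvTA g e ∨ c ∈ q)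

lemma pvAdj_iff (c e : Int × Int) : pvAdj c e ↔
    e = (c.1 - 1, c.2) ∨ e = (c.1 + 1, c.2) ∨ e = (c.1, c.2 - 1) ∨ e = (c.1, c.2 + 1) := by
  obtain ⟨a, b⟩ := c; obtain ⟨x, y⟩ := e
  simp only [pvAdj, pvMoves, List.mem_cons, List.not_mem_nil, or_false, Prod.mk.injEq]
  constructor
  · rintro ⟨m, hm, h1, h2⟩
    rcases hm with h | h | h | h <;> subst h <;> simp_all <;> omega
  · rintro (⟨h1, h2⟩ | ⟨h1, h2⟩ | ⟨h1, h2⟩ | ⟨h1, h2⟩)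
    · exact ⟨(-1, 0), by simp, by omega, by omega⟩
    · exact ⟨(1, 0), by simp, by omega, by omega⟩
    · exact ⟨(0, -1), by simp, by omega, by omega⟩
    · exact ⟨(0, 1), by simp, by omega, by omega⟩

lemma pvAdj_comm (c e : Int × Int) : pvAdj c e ↔ pvAdj e c := by
  obtain ⟨a, b⟩ := c; obtain ⟨x, y⟩ := e
  simp only [pvAdj_iff, Prod.mk.injEq]
  omega

lemma pvTA_iff_mask (N : Nat) (g : List (List Int)) (c : Int × Int) (hc : pvBox N c) :
    pvTA g c ↔ pvMask g c.1.toNat c.2.toNat ≠ 0 := by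
  rw [pvTA, pvMask, PySem.List.pyGetD_of_nonneg _ _ hc.1, PySem.List.pyGetD_of_nonneg _ _ hc.2.2.1]

-- getD after set, with no bounds side conditions
lemma pvGetD_set (g : List (List Int)) (n : Nat) (v : List Int) (a : Nat) (hn : n < g.length) :
    (g.set n v).getD a [] = if a = n then v else g.getD a [] := by
  by_cases ha : a = n
  · subst ha
    rw [List.getD_eq_getElem?_getD, List.getElem?_set_self hn]
    simp
  · rw [List.getD_eq_getElem?_getD, List.getElem?_set_ne (fun h => ha h.symm),
      List.getD_eq_getElem?_getD, if_neg ha]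

lemma pvStep_spec (N : Nat) (g : List (List Int)) (s : List (Int × Int)) (nx ny : Int)
    (hs : pvShaped N g) :
    pvShaped N (pvStep (N : Int) (g, s) nx ny).1 ∧
    (∀ c, pvBox N c → (pvTA (pvStep (N : Int) (g, s) nx ny).1 c ↔
        pvTA g c ∨ (pvBox N (nx, ny) ∧ c = (nx, ny)))) ∧
    (∀ c, c ∈ (pvStep (N : Int) (g, s) nx ny).2 ↔
        c ∈ s ∨ (pvBox N (nx, ny) ∧ c = (nx, ny) ∧ ¬ pvTA g (nx, ny))) := by
  have e : pvStep (N : Int) (g, s) nx ny =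
      if 0 ≤ nx ∧ nx < (N : Int) ∧ 0 ≤ ny ∧ ny < (N : Int) ∧
          PySem.List.pyGetD (PySem.List.pyGetD g nx []) ny 0 = 0 then
        (PySem.List.pySetD g nx (PySem.List.pySetD (PySem.List.pyGetD g nx []) ny 1),
         s ++ [(nx, ny)])
      else (g, s) := rfl
  rw [e]; clear e
  split_ifs with hC
  · obtain ⟨h1, h2, h3, h4, h5⟩ := hC
    have hbox : pvBox N (nx, ny) := ⟨h1, h2, h3, h4⟩
    have hnta : ¬ pvTA g (nx, ny) := by simpa [pvTA] using h5
    have hlen : g.length = N := hs.1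
    have hnx : nx.toNat < g.length := by omega
    have hrow : PySem.List.pyGetD g nx [] = g[nx.toNat] := by
      rw [PySem.List.pyGetD_of_nonneg _ _ h1, List.getD_eq_getElem _ _ hnx]
    have hrlen : N ≤ g[nx.toNat].length := hs.2 _ (List.getElem_mem hnx)
    have hset : PySem.List.pySetD g nx (PySem.List.pySetD (PySem.List.pyGetD g nx []) ny 1) =
        g.set nx.toNat (g[nx.toNat].set ny.toNat 1) := by
      rw [PySem.List.pySetD_of_nonneg _ _ h3, PySem.List.pySetD_of_nonneg _ _ h1, hrow]
    refine ⟨?_, ?_, ?_⟩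
    · refine ⟨by simp [hset, hs.1], ?_⟩
      intro row hmem
      rw [hset] at hmem
      rcases List.mem_or_eq_of_mem_set hmem with h | h
      · exact hs.2 _ h
      · subst h; simpa using hrlen
    · intro c hc
      rw [pvTA_iff_mask N _ c hc, pvTA_iff_mask N g c hc, hset]
      have hc1 : c.1.toNat < g.length := by obtain ⟨a1, a2, a3, a4⟩ := hc; omega
      rw [pvMask, pvMask, pvGetD_set _ _ _ _ hnx]
      by_cases hx : c.1.toNat = nx.toNat
      · rw [if_pos hx]
        by_cases hy : c.2.toNat = ny.toNat
        · have hceq : c = (nx, ny) := by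
            obtain ⟨a, b⟩ := c; obtain ⟨a1, a2, a3, a4⟩ := hc
            simp only [Prod.mk.injEq]; constructor <;> omega
          have hny2 : ny.toNat < g[nx.toNat].length := by omega
          have : (g[nx.toNat].set ny.toNat 1).getD c.2.toNat 0 = 1 := by
            rw [hy, List.getD_eq_getElem?_getD, List.getElem?_set_self hny2]; simp
          simp [hbox, hceq, List.getElem?_set_self hny2]
        · have hcne : c ≠ (nx, ny) := by
            intro h; subst h; simp at hy
          rw [List.getD_eq_getElem?_getD, List.getElem?_set_ne (fun h => hy h.symm),
            ← List.getD_eq_getElem?_getD]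
          simp [hcne, hx, List.getElem?_eq_getElem hnx]
      · rw [if_neg hx]
        have hcne : c ≠ (nx, ny) := by
          intro h; subst h; simp at hx
        simp [hcne]
    · intro c
      simp only [List.mem_append, List.mem_singleton]
      constructor
      · rintro (h | h)
        · exact Or.inl h
        · exact Or.inr ⟨hbox, h, hnta⟩
      · rintro (h | ⟨_, h, _⟩)
        · exact Or.inl h
        · exact Or.inr h
  · refine ⟨hs, ?_, ?_⟩
    · intro c hc
      constructor
      · exact Or.inl
      · rintro (h | ⟨hbox, hceq⟩)
        · exact h
        · subst hceq
          obtain ⟨a1, a2, a3, a4⟩ := hbox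
          simp only [pvTA]
          intro h0
          exact hC ⟨a1, a2, a3, a4, h0⟩
    · intro c
      constructor
      · exact fun h => Or.inl h
      · rintro (h | ⟨hbox, _, hnta⟩)
        · exact h
        · obtain ⟨a1, a2, a3, a4⟩ := hbox
          exact absurd (by simp only [pvTA]; intro h0; exact hC ⟨a1, a2, a3, a4, h0⟩) hnta

lemma pvStep_spec' (N : Nat) (st : List (List Int) × List (Int × Int)) (nx ny : Int)
    (hs : pvShaped N st.1) :
    pvShaped N (pvStep (N : Int) st nx ny).1 ∧
    (∀ c, pvBox N c → (pvTA (pvStep (N : Int) st nx ny).1 c ↔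
        pvTA st.1 c ∨ (pvBox N (nx, ny) ∧ c = (nx, ny)))) ∧
    (∀ c, c ∈ (pvStep (N : Int) st nx ny).2 ↔
        c ∈ st.2 ∨ (pvBox N (nx, ny) ∧ c = (nx, ny) ∧ ¬ pvTA st.1 (nx, ny))) :=
  pvStep_spec N st.1 st.2 nx ny hs

lemma pvInner_spec (N : Nat) (c : Int × Int) (g : List (List Int)) (s : List (Int × Int))
    (hs : pvShaped N g) :
    pvShaped N (pvMoves.foldl (fun st d => pvStep (N : Int) st (c.1 + d.1) (c.2 + d.2)) (g, s)).1 ∧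
    (∀ e, pvBox N e →
      (pvTA (pvMoves.foldl (fun st d => pvStep (N : Int) st (c.1 + d.1) (c.2 + d.2)) (g, s)).1 e ↔
        pvTA g e ∨ pvAdj c e)) ∧
    (∀ e, e ∈ (pvMoves.foldl (fun st d => pvStep (N : Int) st (c.1 + d.1) (c.2 + d.2)) (g, s)).2 ↔
        e ∈ s ∨ (pvBox N e ∧ pvAdj c e ∧ ¬ pvTA g e)) := by
  simp only [pvMoves, List.foldl_cons, List.foldl_nil]
  obtain ⟨sh1, tr1, se1⟩ := pvStep_spec' N (g, s) (c.1 + -1) (c.2 + 0) hs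
  obtain ⟨sh2, tr2, se2⟩ := pvStep_spec' N _ (c.1 + 1) (c.2 + 0) sh1
  obtain ⟨sh3, tr3, se3⟩ := pvStep_spec' N _ (c.1 + 0) (c.2 + -1) sh2
  obtain ⟨sh4, tr4, se4⟩ := pvStep_spec' N _ (c.1 + 0) (c.2 + 1) sh3
  have conv2 : pvBox N (c.1 + 1, c.2 + 0) →
      (pvTA (pvStep (N:Int) (g, s) (c.1 + -1) (c.2 + 0)).1 (c.1 + 1, c.2 + 0) ↔
        pvTA g (c.1 + 1, c.2 + 0)) := by
    intro hb; rw [tr1 _ hb]; simp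
  have conv3 : pvBox N (c.1 + 0, c.2 + -1) →
      (pvTA (pvStep (N:Int) (pvStep (N:Int) (g, s) (c.1 + -1) (c.2 + 0)) (c.1 + 1) (c.2 + 0)).1
        (c.1 + 0, c.2 + -1) ↔ pvTA g (c.1 + 0, c.2 + -1)) := by
    intro hb; rw [tr2 _ hb, tr1 _ hb]; simp
  have conv4 : pvBox N (c.1 + 0, c.2 + 1) →
      (pvTA (pvStep (N:Int) (pvStep (N:Int) (pvStep (N:Int) (g, s) (c.1 + -1) (c.2 + 0))
        (c.1 + 1) (c.2 + 0)) (c.1 + 0) (c.2 + -1)).1 (c.1 + 0, c.2 + 1) ↔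
        pvTA g (c.1 + 0, c.2 + 1)) := by
    intro hb; rw [tr3 _ hb, tr2 _ hb, tr1 _ hb]; simp
  refine ⟨sh4, ?_, ?_⟩
  · intro e he
    rw [tr4 e he, tr3 e he, tr2 e he, tr1 e he]
    have hb1 : e = ((c.1 + -1, c.2 + 0) : Int × Int) → pvBox N (c.1 + -1, c.2 + 0) :=
      fun h => h ▸ he
    have hb2 : e = ((c.1 + 1, c.2 + 0) : Int × Int) → pvBox N (c.1 + 1, c.2 + 0) :=
      fun h => h ▸ he
    have hb3 : e = ((c.1 + 0, c.2 + -1) : Int × Int) → pvBox N (c.1 + 0, c.2 + -1) :=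
      fun h => h ▸ he
    have hb4 : e = ((c.1 + 0, c.2 + 1) : Int × Int) → pvBox N (c.1 + 0, c.2 + 1) :=
      fun h => h ▸ he
    simp only [pvAdj, pvMoves, List.mem_cons, List.not_mem_nil, or_false,
      exists_eq_or_imp, exists_eq_left]
    constructor
    · rintro ((((h | ⟨_, h⟩) | ⟨_, h⟩) | ⟨_, h⟩) | ⟨_, h⟩)
      · exact Or.inl h
      · exact Or.inr (Or.inl h)
      · exact Or.inr (Or.inr (Or.inl h))
      · exact Or.inr (Or.inr (Or.inr (Or.inl h)))
      · exact Or.inr (Or.inr (Or.inr (Or.inr h)))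
    · rintro (h | h | h | h | h)
      · exact Or.inl (Or.inl (Or.inl (Or.inl h)))
      · exact Or.inl (Or.inl (Or.inl (Or.inr ⟨h ▸ he, h⟩)))
      · exact Or.inl (Or.inl (Or.inr ⟨h ▸ he, h⟩))
      · exact Or.inl (Or.inr ⟨h ▸ he, h⟩)
      · exact Or.inr ⟨h ▸ he, h⟩
  · intro e
    rw [se4 e, se3 e, se2 e, se1 e]
    have Y1eq : (pvBox N (c.1 + -1, c.2 + 0) ∧ e = (c.1 + -1, c.2 + 0) ∧
        ¬ pvTA g (c.1 + -1, c.2 + 0)) ↔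
        (pvBox N e ∧ e = (c.1 + -1, c.2 + 0) ∧ ¬ pvTA g e) := by
      constructor
      · rintro ⟨hb, rfl, hn⟩; exact ⟨hb, rfl, hn⟩
      · rintro ⟨hb, rfl, hn⟩; exact ⟨hb, rfl, hn⟩
    have Y2eq : (pvBox N (c.1 + 1, c.2 + 0) ∧ e = (c.1 + 1, c.2 + 0) ∧
        ¬ pvTA (pvStep (N:Int) (g, s) (c.1 + -1) (c.2 + 0)).1 (c.1 + 1, c.2 + 0)) ↔
        (pvBox N e ∧ e = (c.1 + 1, c.2 + 0) ∧ ¬ pvTA g e) := by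
      constructor
      · rintro ⟨hb, rfl, hn⟩; exact ⟨hb, rfl, fun h => hn ((conv2 hb).mpr h)⟩
      · rintro ⟨hb, rfl, hn⟩; exact ⟨hb, rfl, fun h => hn ((conv2 hb).mp h)⟩
    have Y3eq : (pvBox N (c.1 + 0, c.2 + -1) ∧ e = (c.1 + 0, c.2 + -1) ∧
        ¬ pvTA (pvStep (N:Int) (pvStep (N:Int) (g, s) (c.1 + -1) (c.2 + 0))
          (c.1 + 1) (c.2 + 0)).1 (c.1 + 0, c.2 + -1)) ↔
        (pvBox N e ∧ e = (c.1 + 0, c.2 + -1) ∧ ¬ pvTA g e) := by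
      constructor
      · rintro ⟨hb, rfl, hn⟩; exact ⟨hb, rfl, fun h => hn ((conv3 hb).mpr h)⟩
      · rintro ⟨hb, rfl, hn⟩; exact ⟨hb, rfl, fun h => hn ((conv3 hb).mp h)⟩
    have Y4eq : (pvBox N (c.1 + 0, c.2 + 1) ∧ e = (c.1 + 0, c.2 + 1) ∧
        ¬ pvTA (pvStep (N:Int) (pvStep (N:Int) (pvStep (N:Int) (g, s) (c.1 + -1) (c.2 + 0))
          (c.1 + 1) (c.2 + 0)) (c.1 + 0) (c.2 + -1)).1 (c.1 + 0, c.2 + 1)) ↔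
        (pvBox N e ∧ e = (c.1 + 0, c.2 + 1) ∧ ¬ pvTA g e) := by
      constructor
      · rintro ⟨hb, rfl, hn⟩; exact ⟨hb, rfl, fun h => hn ((conv4 hb).mpr h)⟩
      · rintro ⟨hb, rfl, hn⟩; exact ⟨hb, rfl, fun h => hn ((conv4 hb).mp h)⟩
    rw [Y1eq, Y2eq, Y3eq, Y4eq]
    simp only [pvAdj, pvMoves, List.mem_cons, List.not_mem_nil, or_false,
      exists_eq_or_imp, exists_eq_left]
    constructor
    · rintro ((((h | ⟨hb, h1, hn⟩) | ⟨hb, h1, hn⟩) | ⟨hb, h1, hn⟩) | ⟨hb, h1, hn⟩)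
      · exact Or.inl h
      · exact Or.inr ⟨hb, Or.inl h1, hn⟩
      · exact Or.inr ⟨hb, Or.inr (Or.inl h1), hn⟩
      · exact Or.inr ⟨hb, Or.inr (Or.inr (Or.inl h1)), hn⟩
      · exact Or.inr ⟨hb, Or.inr (Or.inr (Or.inr h1)), hn⟩
    · rintro (h | ⟨hb, (h1 | h1 | h1 | h1), hn⟩)
      · exact Or.inl (Or.inl (Or.inl (Or.inl h)))
      · exact Or.inl (Or.inl (Or.inl (Or.inr ⟨hb, h1, hn⟩)))
      · exact Or.inl (Or.inl (Or.inr ⟨hb, h1, hn⟩))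
      · exact Or.inl (Or.inr ⟨hb, h1, hn⟩)
      · exact Or.inr ⟨hb, h1, hn⟩

lemma pvLevel_spec (N : Nat) (q : List (Int × Int)) :
    ∀ (g : List (List Int)) (s : List (Int × Int)), pvShaped N g →
    pvShaped N (q.foldl (fun st c =>
        pvMoves.foldl (fun st d => pvStep (N : Int) st (c.1 + d.1) (c.2 + d.2)) st) (g, s)).1 ∧
    (∀ e, pvBox N e → (pvTA (q.foldl (fun st c =>
        pvMoves.foldl (fun st d => pvStep (N : Int) st (c.1 + d.1) (c.2 + d.2)) st) (g, s)).1 e ↔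
        pvTA g e ∨ ∃ c ∈ q, pvAdj c e)) ∧
    (∀ e, e ∈ (q.foldl (fun st c =>
        pvMoves.foldl (fun st d => pvStep (N : Int) st (c.1 + d.1) (c.2 + d.2)) st) (g, s)).2 ↔
        e ∈ s ∨ (pvBox N e ∧ ¬ pvTA g e ∧ ∃ c ∈ q, pvAdj c e)) := by
  induction q with
  | nil =>
    intro g s hs
    refine ⟨hs, ?_, ?_⟩ <;> simp
  | cons c0 q' ih =>
    intro g s hs
    simp only [List.foldl_cons]
    obtain ⟨sh1, t1, m1⟩ := pvInner_spec N c0 g s hs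
    set P := pvMoves.foldl (fun st d => pvStep (N : Int) st (c0.1 + d.1) (c0.2 + d.2)) (g, s)
      with hP
    obtain ⟨sh2, t2, m2⟩ := ih P.1 P.2 sh1
    simp only [Prod.mk.eta] at sh2 t2 m2
    refine ⟨sh2, ?_, ?_⟩
    · intro e he
      rw [t2 e he, t1 e he]
      simp only [List.mem_cons, exists_eq_or_imp]
      tauto
    · intro e
      rw [m2 e, m1 e]
      have hconv := t1 e
      simp only [List.mem_cons, exists_eq_or_imp]
      tauto

lemma pvDilate_maskS (N : Nat) (cur : List (List Int)) : pvMaskS N (pvDilate N cur) := by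
  refine ⟨by simp [pvDilate], ?_⟩
  intro row hrow
  simp only [pvDilate, List.mem_map, List.mem_range] at hrow
  obtain ⟨i, hi, rfl⟩ := hrow
  refine ⟨by simp, ?_⟩
  intro v hv
  simp only [List.mem_map, List.mem_range] at hv
  obtain ⟨j, hj, rfl⟩ := hv
  split_ifs <;> simp

lemma pvDilate_mask (N : Nat) (cur : List (List Int)) (i j : Nat) (hi : i < N) (hj : j < N) :
    pvMask (pvDilate N cur) i j =
    if pvMask cur i j ≠ 0 ∨ (0 < i ∧ pvMask cur (i - 1) j ≠ 0) ∨
        (i + 1 < N ∧ pvMask cur (i + 1) j ≠ 0) ∨ (0 < j ∧ pvMask cur i (j - 1) ≠ 0) ∨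
        (j + 1 < N ∧ pvMask cur i (j + 1) ≠ 0)
    then 1 else 0 := by
  rw [pvMask, pvDilate, PySem.List.getD_map_range _ _ _ _ hi,
    PySem.List.getD_map_range _ _ _ _ hj]

lemma pvDilate_truthy (N : Nat) (cur : List (List Int)) (c : Int × Int) (hc : pvBox N c) :
    pvTB (pvDilate N cur) c ↔ pvTB cur c ∨ ∃ d, pvBox N d ∧ pvTB cur d ∧ pvAdj d c := by
  obtain ⟨a, b⟩ := c
  obtain ⟨h1, h2, h3, h4⟩ := hc
  have hi : a.toNat < N := by omega
  have hj : b.toNat < N := by omega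
  rw [pvTB, pvDilate_mask N cur _ _ hi hj]
  have hite : ∀ (p : Prop) [Decidable p], ((if p then (1 : Int) else 0) ≠ 0 ↔ p) := by
    intro p _; split_ifs with h <;> simp [h]
  rw [hite]
  constructor
  · rintro (h | ⟨hg, h⟩ | ⟨hg, h⟩ | ⟨hg, h⟩ | ⟨hg, h⟩)
    · exact Or.inl h
    · refine Or.inr ⟨(a - 1, b), ⟨by omega, by omega, by omega, by omega⟩, ?_, ?_⟩
      · show pvMask cur (a - 1).toNat b.toNat ≠ 0
        have he : (a - 1).toNat = a.toNat - 1 := by omega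
        rw [he]; exact h
      · rw [pvAdj_comm, pvAdj_iff]; exact Or.inl rfl
    · refine Or.inr ⟨(a + 1, b), ⟨by omega, by omega, by omega, by omega⟩, ?_, ?_⟩
      · show pvMask cur (a + 1).toNat b.toNat ≠ 0
        have he : (a + 1).toNat = a.toNat + 1 := by omega
        rw [he]; exact h
      · rw [pvAdj_comm, pvAdj_iff]; exact Or.inr (Or.inl rfl)
    · refine Or.inr ⟨(a, b - 1), ⟨by omega, by omega, by omega, by omega⟩, ?_, ?_⟩
      · show pvMask cur a.toNat (b - 1).toNat ≠ 0
        have he : (b - 1).toNat = b.toNat - 1 := by omega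
        rw [he]; exact h
      · rw [pvAdj_comm, pvAdj_iff]; exact Or.inr (Or.inr (Or.inl rfl))
    · refine Or.inr ⟨(a, b + 1), ⟨by omega, by omega, by omega, by omega⟩, ?_, ?_⟩
      · show pvMask cur a.toNat (b + 1).toNat ≠ 0
        have he : (b + 1).toNat = b.toNat + 1 := by omega
        rw [he]; exact h
      · rw [pvAdj_comm, pvAdj_iff]; exact Or.inr (Or.inr (Or.inr rfl))
  · rintro (h | ⟨d, hbd, htd, hadj⟩)
    · exact Or.inl h
    · rw [pvAdj_comm, pvAdj_iff] at hadj
      obtain ⟨hd1, hd2, hd3, hd4⟩ := hbd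
      rcases hadj with h | h | h | h <;> subst h
      · refine Or.inr (Or.inl ⟨by simp at hd1 ⊢; omega, ?_⟩)
        have he : (a - 1).toNat = a.toNat - 1 := by simp at hd1; omega
        rw [pvTB] at htd; rw [← he]; exact htd
      · refine Or.inr (Or.inr (Or.inl ⟨by simp at hd2; omega, ?_⟩))
        have he : (a + 1).toNat = a.toNat + 1 := by omega
        rw [pvTB] at htd; rw [← he]; exact htd
      · refine Or.inr (Or.inr (Or.inr (Or.inl ⟨by simp at hd3 ⊢; omega, ?_⟩)))
        have he : (b - 1).toNat = b.toNat - 1 := by simp at hd3; omega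
        rw [pvTB] at htd; rw [← he]; exact htd
      · refine Or.inr (Or.inr (Or.inr (Or.inr ⟨by simp at hd4; omega, ?_⟩)))
        have he : (b + 1).toNat = b.toNat + 1 := by omega
        rw [pvTB] at htd; rw [← he]; exact htd

lemma pvMask_ext (N : Nat) (m1 m2 : List (List Int)) (h1 : pvMaskS N m1) (h2 : pvMaskS N m2)
    (h : ∀ c, pvBox N c → (pvTB m1 c ↔ pvTB m2 c)) : m1 = m2 := by
  obtain ⟨l1, r1⟩ := h1
  obtain ⟨l2, r2⟩ := h2
  apply List.ext_getElem (l1.trans l2.symm)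
  intro i hi1 hi2
  have hri1 := r1 _ (List.getElem_mem hi1)
  have hri2 := r2 _ (List.getElem_mem hi2)
  apply List.ext_getElem (hri1.1.trans hri2.1.symm)
  intro j hj1 hj2
  have hiN : i < N := l1 ▸ hi1
  have hjN : j < N := hri1.1 ▸ hj1
  have hbox : pvBox N ((i : Int), (j : Int)) := ⟨by omega, by omega, by omega, by omega⟩
  have ht := h _ hbox
  simp only [pvTB, pvMask, Int.toNat_natCast] at ht
  rw [List.getD_eq_getElem _ _ hi1, List.getD_eq_getElem _ _ hi2,
    List.getD_eq_getElem _ _ hj1, List.getD_eq_getElem _ _ hj2] at ht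
  have hv1 := hri1.2 _ (List.getElem_mem hj1)
  have hv2 := hri2.2 _ (List.getElem_mem hj2)
  rcases hv1 with hv1 | hv1 <;> rcases hv2 with hv2 | hv2 <;> simp_all

lemma pvLoopA_zero (N : Int) (g : List (List Int)) (q : List (Int × Int)) (s : Int) :
    pvLoopA N 0 g q s = s := by
  rw [pvLoopA]; split <;> rfl

lemma pvLoopA_succ (N : Int) (f : Nat) (g : List (List Int)) (q : List (Int × Int)) (s : Int)
    (h : q ≠ []) :
    pvLoopA N (f + 1) g q s = pvLoopA N f (pvLevel N g q).1 (pvLevel N g q).2 (s + 1) := by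
  rw [pvLoopA, if_neg h]

lemma pvLoopB_succ (N f : Nat) (cur : List (List Int)) (s : Int) :
    pvLoopB N (f + 1) cur s =
      if pvDilate N cur = cur then s else pvLoopB N f (pvDilate N cur) (s + 1) := rfl

lemma pvLoop_eq (N : Nat) (f : Nat) :
    ∀ (g : List (List Int)) (q : List (Int × Int)) (cur : List (List Int)) (s : Int),
    pvRel N g q cur → q ≠ [] →
    pvLoopA (N : Int) (f + 1) g q s = pvLoopB N f cur (s + 1) := by
  induction f with
  | zero =>
    intro g q cur s hrel hq
    rw [pvLoopA_succ _ _ _ _ _ hq, pvLoopA_zero, pvLoopB]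
  | succ f ih =>
    intro g q cur s hrel hq
    obtain ⟨hsh, hms, hagree, hqprops, hclosure⟩ := hrel
    obtain ⟨sh', tr', se'⟩ := pvLevel_spec N q g [] hsh
    have hkey : ∀ e, pvBox N e →
        (pvTA (pvLevel (N : Int) g q).1 e ↔ pvTB (pvDilate N cur) e) := by
      intro e he
      rw [show (pvLevel (N : Int) g q).1 = (q.foldl (fun st c =>
        pvMoves.foldl (fun st d => pvStep (N : Int) st (c.1 + d.1) (c.2 + d.2)) st) (g, [])).1
        from rfl, tr' e he, pvDilate_truthy N cur e he]
      constructor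
      · rintro (h | ⟨c, hcq, hadj⟩)
        · exact Or.inl ((hagree e he).mp h)
        · obtain ⟨hbc, htc⟩ := hqprops c hcq
          exact Or.inr ⟨c, hbc, (hagree c hbc).mp htc, hadj⟩
      · rintro (h | ⟨d, hbd, htd, hadj⟩)
        · exact Or.inl ((hagree e he).mpr h)
        · have htd' := (hagree d hbd).mpr htd
          rcases hclosure d hbd htd' e he hadj with h | h
          · exact Or.inl h
          · exact Or.inr ⟨d, h, hadj⟩
    have hmem : ∀ e, e ∈ (pvLevel (N : Int) g q).2 ↔
        pvBox N e ∧ ¬ pvTA g e ∧ ∃ c ∈ q, pvAdj c e := by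
      intro e
      rw [show (pvLevel (N : Int) g q).2 = (q.foldl (fun st c =>
        pvMoves.foldl (fun st d => pvStep (N : Int) st (c.1 + d.1) (c.2 + d.2)) st) (g, [])).2
        from rfl, se' e]
      simp
    have htr : ∀ e, pvBox N e → (pvTA (pvLevel (N : Int) g q).1 e ↔
        pvTA g e ∨ ∃ c ∈ q, pvAdj c e) := fun e he => tr' e he
    rw [pvLoopA_succ _ _ _ _ _ hq, pvLoopB_succ]
    by_cases hQ : (pvLevel (N : Int) g q).2 = []
    · -- no cell was marked this round: the dilation does not change the mask either
      have hsame : ∀ e, pvBox N e → (pvTA (pvLevel (N : Int) g q).1 e ↔ pvTA g e) := by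
        intro e he
        rw [htr e he]
        constructor
        · rintro (h | hex)
          · exact h
          · by_cases hg : pvTA g e
            · exact hg
            · exact absurd ((hmem e).mpr ⟨he, hg, hex⟩) (by simp [hQ])
        · exact Or.inl
      have hcur : pvDilate N cur = cur := by
        apply pvMask_ext N _ _ (pvDilate_maskS N cur) hms
        intro e he
        rw [← hkey e he, hsame e he, hagree e he]
      rw [hQ, pvLoopA, if_pos rfl, if_pos hcur]
    · have hne : pvDilate N cur ≠ cur := by
        intro hEq
        obtain ⟨e0, he0⟩ := List.exists_mem_of_ne_nil _ hQ
        obtain ⟨hb0, hnt0, hex0⟩ := (hmem e0).mp he0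
        have htG : pvTA (pvLevel (N : Int) g q).1 e0 := (htr e0 hb0).mpr (Or.inr hex0)
        have h1 : pvTB (pvDilate N cur) e0 := (hkey e0 hb0).mp htG
        rw [hEq] at h1
        exact hnt0 ((hagree e0 hb0).mpr h1)
      rw [if_neg hne]
      apply ih _ _ _ _ ?_ hQ
      refine ⟨sh', pvDilate_maskS N cur, hkey, ?_, ?_⟩
      · intro e he
        obtain ⟨hb, hnt, hex⟩ := (hmem e).mp he
        exact ⟨hb, (htr e hb).mpr (Or.inr hex)⟩
      · intro c hbc htc e hbe hadj
        by_cases hg : pvTA g c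
        · rcases hclosure c hbc hg e hbe hadj with h | h
          · exact Or.inl ((htr e hbe).mpr (Or.inl h))
          · exact Or.inl ((htr e hbe).mpr (Or.inr ⟨c, h, hadj⟩))
        · have : ∃ c' ∈ q, pvAdj c' c := by
            rcases (htr c hbc).mp htc with h | h
            · exact absurd h hg
            · exact h
          exact Or.inr ((hmem c).mpr ⟨hbc, hg, this⟩)

lemma pvMain (grid : List (List Int)) (hpre : ∀ row ∈ grid, grid.length ≤ row.length) :
    maxDistance1 grid = maxDistance1_alt grid := by
  simp only [maxDistance1, maxDistance1_alt]
  set L := grid.length with hL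
  set q := (List.range L).flatMap (fun (i : Nat) =>
    ((List.range L).filter (fun (j : Nat) =>
      PySem.List.pyGetD (PySem.List.pyGetD grid (i : Int) []) ((j : Int)) 0 ≠ 0)).map
      (fun (j : Nat) => ((i : Int), (j : Int)))) with hq
  set cur := (List.range L).map (fun (i : Nat) => (List.range L).map (fun (j : Nat) =>
    if PySem.List.pyGetD (PySem.List.pyGetD grid (i : Int) []) ((j : Int)) 0 ≠ 0
    then (1 : Int) else 0)) with hcur
  have hq_mem : ∀ e, e ∈ q ↔ pvBox L e ∧ pvTA grid e := by
    intro e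
    rw [hq]
    simp only [List.mem_flatMap, List.mem_map, List.mem_filter, List.mem_range]
    constructor
    · rintro ⟨i, hi, j, ⟨hj, hp⟩, rfl⟩
      refine ⟨by dsimp only [pvBox]; omega, ?_⟩
      simpa [pvTA] using hp
    · rintro ⟨⟨hb1, hb2, hb3, hb4⟩, ht⟩
      have h1 : ((e.1.toNat : Nat) : Int) = e.1 := by omega
      have h2 : ((e.2.toNat : Nat) : Int) = e.2 := by omega
      refine ⟨e.1.toNat, by omega, e.2.toNat, ⟨by omega, by simpa [pvTA, h1, h2] using ht⟩, ?_⟩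
      obtain ⟨a, b⟩ := e
      simp only [Prod.mk.injEq]
      constructor <;> omega
  have hrow : ∀ i : Nat, ((List.range L).map (fun (j : Nat) =>
      if PySem.List.pyGetD (PySem.List.pyGetD grid (i : Int) []) ((j : Int)) 0 ≠ 0
      then (1 : Int) else 0)).sum =
      (((List.range L).filter (fun (j : Nat) =>
        PySem.List.pyGetD (PySem.List.pyGetD grid (i : Int) []) ((j : Int)) 0 ≠ 0)).length : Int) := by
    intro i
    rw [← List.countP_eq_length_filter]
    have := PySem.List.sum_map_ite_one_zero (fun (j : Nat) =>
      decide (PySem.List.pyGetD (PySem.List.pyGetD grid (i : Int) []) ((j : Int)) 0 ≠ 0))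
      (List.range L)
    simp only [decide_eq_true_eq] at this
    exact this
  have hflat : ∀ l : List (List Int),
      (l.flatMap (fun row => row)).sum = (l.map (fun r => r.sum)).sum := fun l => by simp
  have htotal : (cur.flatMap (fun row => row)).sum = (q.length : Int) := by
    rw [hflat, hcur, hq, List.length_flatMap, List.map_map]
    simp only [List.length_map]
    rw [Nat.cast_list_sum, List.map_map]
    congr 1
    apply List.map_congr_left
    intro i _
    simpa using hrow i
  have hguard : ((cur.flatMap (fun row => row)).sum = 0 ∨
      (cur.flatMap (fun row => row)).sum = (L : Int) * L) ↔
      (q = [] ∨ (q.length : Int) = (L : Int) * L) := by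
    rw [htotal]
    constructor
    · rintro (h | h)
      · left
        rw [← List.length_eq_zero_iff]
        omega
      · exact Or.inr h
    · rintro (h | h)
      · left; rw [h]; rfl
      · exact Or.inr h
  by_cases hg : q = [] ∨ (q.length : Int) = (L : Int) * L
  · rw [if_pos hg, if_pos (hguard.mpr hg)]
  · rw [if_neg hg, if_neg (fun h => hg (hguard.mp h))]
    have hqne : q ≠ [] := fun h => hg (Or.inl h)
    have hrel : pvRel L grid q cur := by
      refine ⟨⟨hL.symm, hpre⟩, ?_, ?_, ?_, ?_⟩
      · -- mask-shape of cur
        refine ⟨by simp [hcur], ?_⟩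
        intro row hrowm
        rw [hcur] at hrowm
        simp only [List.mem_map, List.mem_range] at hrowm
        obtain ⟨i, hi, rfl⟩ := hrowm
        refine ⟨by simp, ?_⟩
        intro v hv
        simp only [List.mem_map, List.mem_range] at hv
        obtain ⟨j, hj, rfl⟩ := hv
        split_ifs <;> simp
      · -- the mask agrees with the grid on the box
        intro c hc
        obtain ⟨hb1, hb2, hb3, hb4⟩ := hc
        have hi : c.1.toNat < L := by omega
        have hj : c.2.toNat < L := by omega
        rw [pvTB, pvMask, hcur, PySem.List.getD_map_range _ _ _ _ hi,
          PySem.List.getD_map_range _ _ _ _ hj]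
        have h1 : ((c.1.toNat : Nat) : Int) = c.1 := by omega
        have h2 : ((c.2.toNat : Nat) : Int) = c.2 := by omega
        rw [h1, h2]
        split_ifs with h <;> simp [pvTA, h]
      · exact fun c hc => (hq_mem c).mp hc
      · exact fun c hbc htc e _ _ => Or.inr ((hq_mem c).mpr ⟨hbc, htc⟩)
    have := pvLoop_eq L (2 * L + 1) grid q cur (-1) hrel hqne
    simpa using this

-- ===== VERDICT (by name: the statement is the Claim_ definition above) =====
theorem maxDistance1_spec : Claim_equal_maxDistance1 := by
  intro grid _ hpre
  exact pvMain grid hpre
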